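-- pv_equiv track=rewrite | github.com/bnt52012/astreli | services/scenario/prompts.py | _platforms_to_aspect_ratio
-- ===== SOURCE A (Python) =====
-- from typing import List, Optional
--
-- def _platforms_to_aspect_ratio(platforms: Optional[List[str]]) -> str:
--     if not platforms:
--         return "9:16"
--     p = [s.lower() for s in platforms]
--     if any(k in s for s in p for k in ("reel", "tiktok", "short", "story")):
--         return "9:16"
--     if any(k in s for s in p for k in ("linkedin", "square")):
--         return "1:1"
--     if any(k in s for s in p for k in ("youtube", "16:9", "landscape")):
--         return "16:9"
--     return "9:16"
-- ===== SOURCE B (Python) =====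
-- from typing import List, Optional
--
-- _RATIOS = ["9:16", "1:1", "16:9"]
-- _GROUPS = [("reel", "tiktok", "short", "story"),
--            ("linkedin", "square"),
--            ("youtube", "16:9", "landscape")]
--
-- def _platforms_to_aspect_ratio(platforms: Optional[List[str]]) -> str:
--     if not platforms:
--         return "9:16"
--     best = 3  # index past the last group = "no match yet"
--     for s in platforms:
--         s = s.lower()
--         for i, kws in enumerate(_GROUPS):
--             if i < best and any(k in s for k in kws):
--                 best = i
--                 break
--     return _RATIOS[best] if best < 3 else "9:16"
-- ===== Notes on version B (the rewrite author's own statement) =====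
-- stated objective: alternative
-- what changed: Replaced the three group-major any() sweeps over the whole platform list with a single platform-major pass that keeps a running minimum group index and returns the ratio for the lowest-priority group matched.
import Mathlib
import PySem

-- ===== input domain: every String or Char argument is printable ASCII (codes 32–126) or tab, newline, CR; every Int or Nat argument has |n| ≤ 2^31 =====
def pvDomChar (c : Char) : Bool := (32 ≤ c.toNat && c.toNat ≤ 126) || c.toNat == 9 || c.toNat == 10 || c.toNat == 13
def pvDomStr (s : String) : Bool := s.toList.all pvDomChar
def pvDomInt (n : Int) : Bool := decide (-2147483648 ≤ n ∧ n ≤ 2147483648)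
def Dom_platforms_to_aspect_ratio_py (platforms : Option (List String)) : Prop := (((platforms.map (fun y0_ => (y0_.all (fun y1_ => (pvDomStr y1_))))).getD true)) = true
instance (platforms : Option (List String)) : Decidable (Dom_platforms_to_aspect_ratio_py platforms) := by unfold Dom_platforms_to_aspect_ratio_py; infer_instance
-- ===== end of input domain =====

-- B replaces A's three group-major any() sweeps with one platform-major pass keeping a running
-- minimum group index (objective: alternative decomposition, same cost).

-- ===== PORT A =====
def platforms_to_aspect_ratio_py (platforms : Option (List String)) : String :=
  match platforms with
  | none => "9:16"
  | some ps =>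
    if ps.isEmpty then "9:16"
    else
      let p := ps.map PySem.Str.lower
      if p.any (fun s => ["reel", "tiktok", "short", "story"].any (fun k => PySem.Str.isIn k s)) then "9:16"
      else if p.any (fun s => ["linkedin", "square"].any (fun k => PySem.Str.isIn k s)) then "1:1"
      else if p.any (fun s => ["youtube", "16:9", "landscape"].any (fun k => PySem.Str.isIn k s)) then "16:9"
      else "9:16"

-- ===== PORT B =====
def pvRatios : List String := ["9:16", "1:1", "16:9"]

def pvGroups : List (List String) :=
  [["reel", "tiktok", "short", "story"], ["linkedin", "square"], ["youtube", "16:9", "landscape"]]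

-- the inner 'for i, kws in enumerate(_GROUPS): if i < best and any(k in s for k in kws): best = i; break'
def pvInnerLoop (s : String) (groups : List (Int × List String)) (best : Int) : Int :=
  match groups with
  | [] => best
  | (i, kws) :: rest =>
    if decide (i < best) && kws.any (fun k => PySem.Str.isIn k s) then i
    else pvInnerLoop s rest best

def platforms_to_aspect_ratio_py_alt (platforms : Option (List String)) : String :=
  match platforms with
  | none => "9:16"
  | some ps =>
    if ps.isEmpty then "9:16"
    else
      let best := ps.foldl (fun best s => pvInnerLoop (PySem.Str.lower s) (PySem.List.enumerate pvGroups) best) 3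
      if best < 3 then PySem.List.pyGetD pvRatios best "9:16" else "9:16"

-- ===== PRECONDITION & SPEC =====
def Spec_platforms_to_aspect_ratio_py (platforms : Option (List String)) (out : String) : Prop := out = platforms_to_aspect_ratio_py_alt platforms
instance (platforms : Option (List String)) (out : String) : Decidable (Spec_platforms_to_aspect_ratio_py platforms out) := by unfold Spec_platforms_to_aspect_ratio_py; infer_instance

-- ===== CLAIM (what is proved, stated in full; the proofs are below) =====
def Claim_equal_platforms_to_aspect_ratio_py : Prop := ∀ (platforms : Option (List String)), Dom_platforms_to_aspect_ratio_py platforms → Spec_platforms_to_aspect_ratio_py platforms (platforms_to_aspect_ratio_py platforms)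

-- ===== LEMMAS AND PROOFS =====

def pvG0 (s : String) : Bool := ["reel", "tiktok", "short", "story"].any (fun k => PySem.Str.isIn k s)
def pvG1 (s : String) : Bool := ["linkedin", "square"].any (fun k => PySem.Str.isIn k s)
def pvG2 (s : String) : Bool := ["youtube", "16:9", "landscape"].any (fun k => PySem.Str.isIn k s)

def pvIdx (s : String) : Int := if pvG0 s then 0 else if pvG1 s then 1 else if pvG2 s then 2 else 3

def pvMin : List String → Int
  | [] => 3
  | s :: t => min (pvIdx (PySem.Str.lower s)) (pvMin t)

theorem pvIdx_bounds (s : String) : 0 ≤ pvIdx s ∧ pvIdx s ≤ 3 := by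
  unfold pvIdx; split_ifs <;> omega

theorem pvInnerLoop_eq (s : String) (best : Int) (hb : best ≤ 3) :
    pvInnerLoop s (PySem.List.enumerate pvGroups) best = min (pvIdx s) best := by
  have e0 : (["reel", "tiktok", "short", "story"].any (fun k => PySem.Str.isIn k s)) = pvG0 s := rfl
  have e1 : (["linkedin", "square"].any (fun k => PySem.Str.isIn k s)) = pvG1 s := rfl
  have e2 : (["youtube", "16:9", "landscape"].any (fun k => PySem.Str.isIn k s)) = pvG2 s := rfl
  simp only [pvGroups, PySem.List.enumerate, pvInnerLoop, pvIdx, e0, e1, e2]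
  cases hg0 : pvG0 s <;> cases hg1 : pvG1 s <;> cases hg2 : pvG2 s <;>
    simp [*] <;> (try split_ifs) <;> omega

theorem pvFold_eq (ps : List String) (b : Int) (hb : b ≤ 3) :
    ps.foldl (fun best s => pvInnerLoop (PySem.Str.lower s) (PySem.List.enumerate pvGroups) best) b
      = min (pvMin ps) b := by
  induction ps generalizing b with
  | nil => simp [pvMin]; omega
  | cons s t ih =>
    have h := pvIdx_bounds (PySem.Str.lower s)
    rw [List.foldl_cons, pvInnerLoop_eq _ _ hb, ih _ (by omega)]
    simp [pvMin]; omega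

theorem pvMin_eq (ps : List String) :
    pvMin ps =
      (if ps.any (fun s => pvG0 (PySem.Str.lower s)) then 0
       else if ps.any (fun s => pvG1 (PySem.Str.lower s)) then 1
       else if ps.any (fun s => pvG2 (PySem.Str.lower s)) then 2
       else 3) := by
  induction ps with
  | nil => simp [pvMin]
  | cons s t ih =>
    simp only [pvMin, ih, pvIdx, List.any_cons]
    by_cases h0 : pvG0 (PySem.Str.lower s) <;>
    by_cases h1 : pvG1 (PySem.Str.lower s) <;>
    by_cases h2 : pvG2 (PySem.Str.lower s) <;>
      simp [h0, h1, h2] <;> split_ifs <;> omega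

-- ===== VERDICT (by name: the statement is the Claim_ definition above) =====
theorem platforms_to_aspect_ratio_py_spec : Claim_equal_platforms_to_aspect_ratio_py := by
  intro platforms _
  unfold Spec_platforms_to_aspect_ratio_py platforms_to_aspect_ratio_py platforms_to_aspect_ratio_py_alt
  match platforms with
  | none => rfl
  | some ps =>
    by_cases he : ps.isEmpty
    · simp [he]
    · have hA0 : ((ps.map PySem.Str.lower).any (fun s => (["reel", "tiktok", "short", "story"] : List String).any (fun k => PySem.Str.isIn k s)))
        = ps.any (fun s => pvG0 (PySem.Str.lower s)) := by simp [pvG0, List.any_map, Function.comp_def]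
      have hA1 : ((ps.map PySem.Str.lower).any (fun s => (["linkedin", "square"] : List String).any (fun k => PySem.Str.isIn k s)))
        = ps.any (fun s => pvG1 (PySem.Str.lower s)) := by simp [pvG1, List.any_map, Function.comp_def]
      have hA2 : ((ps.map PySem.Str.lower).any (fun s => (["youtube", "16:9", "landscape"] : List String).any (fun k => PySem.Str.isIn k s)))
        = ps.any (fun s => pvG2 (PySem.Str.lower s)) := by simp [pvG2, List.any_map, Function.comp_def]
      have hf := pvFold_eq ps 3 (by omega)
      simp only [he, hf, pvMin_eq, hA0, hA1, hA2, if_false, Bool.false_eq_true]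
      by_cases h0 : ps.any (fun s => pvG0 (PySem.Str.lower s)) = true <;>
      by_cases h1 : ps.any (fun s => pvG1 (PySem.Str.lower s)) = true <;>
      by_cases h2 : ps.any (fun s => pvG2 (PySem.Str.lower s)) = true <;>
        simp [h0, h1, h2, pvRatios, PySem.List.pyGetD]
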